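-- pv_equiv track=rewrite | github.com/ChiraMircea/led_equalizer | led_matrix/apps/waves.py | get_band_color
-- ===== SOURCE A (Python) =====
-- def get_band_color(leds):
--     """Color leds depending on their 'warmth'.
--
--     Bottom leds will be a cold blue and top leds will be a bright red. Those in
--     between will offer a gradient.
--     """
--     band = []
--
--     for i in range(16):
--         if i <= leds:
--             if i <= 8:
--                 if i <= 2:
--                     color = (255 - i * 127, 0, i * 127)
--                 else:
--                     color = (0, 42 * (i - 2), 255)
--             else:
--                 color = (0, 255, 255 - 31 * (i-8))
--         else:
--             color = (0,0,0)
--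
--         band.append(color)
--
--     return band
-- ===== SOURCE B (Python) =====
-- PALETTE = [
--     (255, 0, 0), (128, 0, 127), (1, 0, 254),
--     (0, 42, 255), (0, 84, 255), (0, 126, 255), (0, 168, 255), (0, 210, 255), (0, 252, 255),
--     (0, 255, 224), (0, 255, 193), (0, 255, 162), (0, 255, 131), (0, 255, 100), (0, 255, 69), (0, 255, 38),
-- ]
--
-- def get_band_color(leds):
--     return [c if i <= leds else (0, 0, 0) for i, c in enumerate(PALETTE)]
-- ===== Notes on version B (the rewrite author's own statement) =====
-- stated objective: idiomatic
-- what changed: Replaced the nested threshold branches computing each color arithmetically with a precomputed fixed PALETTE constant and a single enumerate pass that indexes it (black past the level).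
import Mathlib
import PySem

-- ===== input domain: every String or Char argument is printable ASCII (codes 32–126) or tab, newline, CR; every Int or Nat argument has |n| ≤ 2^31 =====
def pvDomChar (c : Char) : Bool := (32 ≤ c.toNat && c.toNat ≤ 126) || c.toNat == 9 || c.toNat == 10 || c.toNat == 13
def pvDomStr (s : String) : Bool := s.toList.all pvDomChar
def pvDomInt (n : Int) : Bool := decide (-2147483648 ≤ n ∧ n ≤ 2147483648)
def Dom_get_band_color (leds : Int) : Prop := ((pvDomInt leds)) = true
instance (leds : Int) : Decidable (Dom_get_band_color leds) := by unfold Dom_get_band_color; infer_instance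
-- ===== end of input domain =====

-- B replaces A's nested threshold arithmetic with a precomputed 16-color palette indexed in one pass (objective: idiomatic).

-- ===== PORT A =====
-- literal transliteration of A: loop over range(16), nested ifs, append to band
def get_band_color (leds : Int) : List (Int × Int × Int) :=
  (PySem.List.pyRange 0 16 1).foldl
    (fun band i =>
      let color :=
        if i ≤ leds then
          if i ≤ 8 then
            if i ≤ 2 then (255 - i * 127, 0, i * 127)
            else (0, 42 * (i - 2), 255)
          else (0, 255, 255 - 31 * (i - 8))
        else (0, 0, 0)
      band ++ [color]) []

-- ===== PORT B =====
def PALETTE : List (Int × Int × Int) :=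
  [(255, 0, 0), (128, 0, 127), (1, 0, 254),
   (0, 42, 255), (0, 84, 255), (0, 126, 255), (0, 168, 255), (0, 210, 255), (0, 252, 255),
   (0, 255, 224), (0, 255, 193), (0, 255, 162), (0, 255, 131), (0, 255, 100), (0, 255, 69), (0, 255, 38)]

def get_band_color_alt (leds : Int) : List (Int × Int × Int) :=
  (PySem.List.enumerate PALETTE).map (fun p => if (p.1 : Int) ≤ leds then p.2 else (0, 0, 0))

-- ===== PRECONDITION & SPEC =====
def Spec_get_band_color (leds : Int) (out : List (Int × Int × Int)) : Prop := out = get_band_color_alt leds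
instance (leds : Int) (out : List (Int × Int × Int)) : Decidable (Spec_get_band_color leds out) := by unfold Spec_get_band_color; infer_instance

-- ===== CLAIM (what is proved, stated in full; the proofs are below) =====
def Claim_equal_get_band_color : Prop := ∀ (leds : Int), Dom_get_band_color leds → Spec_get_band_color leds (get_band_color leds)

-- ===== LEMMAS AND PROOFS =====

-- ===== VERDICT (by name: the statement is the Claim_ definition above) =====
theorem get_band_color_spec : Claim_equal_get_band_color := by
  intro leds _
  unfold Spec_get_band_color get_band_color get_band_color_alt PALETTE
  rw [show PySem.List.pyRange 0 16 1 = [0,1,2,3,4,5,6,7,8,9,10,11,12,13,14,15] from by decide]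
  norm_num [List.foldl, PySem.List.enumerate, List.map]
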